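-- pv_equiv track=rewrite | github.com/m1nnh/Problem-Solving | Programmers/퍼즐 조각 채우기.py | dfs
-- ===== SOURCE A (Python) =====
-- def dfs(board, x, y, position, length, n):
--     dx = [-1, 1, 0, 0]
--     dy = [0, 0, -1, 1]
--
--     npos = [position]
--
--     for i in range(4):
--         nx = x + dx[i]
--         ny = y + dy[i]
--
--         if 0 <= nx < length and 0 <= ny < length:
--             if board[nx][ny] == n:
--                 board[nx][ny] = 2
--                 npos = npos + dfs(board, nx, ny, [position[0] + dx[i], position[1] + dy[i]], length, n)
--
--     return npos
-- ===== SOURCE B (Python) =====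
-- def dfs(board, x, y, position, length, n):
--     dx = [-1, 1, 0, 0]
--     dy = [0, 0, -1, 1]
--
--     result = [position]
--     stack = [(x, y, position, 0)]
--
--     while stack:
--         cx, cy, cpos, i = stack.pop()
--         while i < 4:
--             nx = cx + dx[i]
--             ny = cy + dy[i]
--             i += 1
--             if 0 <= nx < length and 0 <= ny < length and board[nx][ny] == n:
--                 board[nx][ny] = 2
--                 npos = [cpos[0] + dx[i - 1], cpos[1] + dy[i - 1]]
--                 result.append(npos)
--                 stack.append((cx, cy, cpos, i))
--                 stack.append((nx, ny, npos, 0))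
--                 break
--
--     return result
-- ===== Notes on version B (the rewrite author's own statement) =====
-- stated objective: alternative
-- what changed: The recursive DFS is replaced by an explicit stack of (x, y, position, next-direction) frames that simulates the call stack, appending each position at discovery time, so the preorder output and the mark-before-recursing board mutations are reproduced without Python recursion (no recursion-depth limit).
import Mathlib
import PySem

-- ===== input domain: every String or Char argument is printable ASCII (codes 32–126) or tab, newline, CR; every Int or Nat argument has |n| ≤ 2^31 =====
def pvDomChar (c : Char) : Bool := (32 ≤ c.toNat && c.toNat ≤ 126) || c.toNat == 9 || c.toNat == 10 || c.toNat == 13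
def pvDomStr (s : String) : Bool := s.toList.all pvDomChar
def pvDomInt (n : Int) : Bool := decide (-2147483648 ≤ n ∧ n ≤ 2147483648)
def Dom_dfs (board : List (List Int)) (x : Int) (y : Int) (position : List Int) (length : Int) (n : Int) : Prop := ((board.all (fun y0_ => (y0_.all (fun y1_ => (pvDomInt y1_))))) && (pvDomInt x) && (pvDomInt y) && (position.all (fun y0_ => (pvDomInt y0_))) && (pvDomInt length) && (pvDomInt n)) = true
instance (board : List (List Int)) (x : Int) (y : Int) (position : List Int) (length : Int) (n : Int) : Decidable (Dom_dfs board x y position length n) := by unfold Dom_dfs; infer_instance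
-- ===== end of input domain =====

-- B replaces A's recursive DFS by an explicit stack of (x, y, position, next-direction) frames that
-- simulates the call stack (same preorder output, same board marking); equivalence is about the return
-- value — both Pythons mutate `board` in place, and they perform the identical mutations.

-- shared small helpers (both Pythons define the same dx/dy tables and index board the same way)
def dxv (i : Nat) : Int := [(-1 : Int), 1, 0, 0].getD i 0
def dyv (i : Nat) : Int := [(0 : Int), 0, -1, 1].getD i 0
-- board[nx][ny] read; indices are guarded 0 ≤ nx, 0 ≤ ny at every use site
def getCell (b : List (List Int)) (nx ny : Int) : Int :=
  PySem.List.pyGetD (PySem.List.pyGetD b nx []) ny 0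
-- board[nx][ny] = v; guarded 0 ≤ nx, 0 ≤ ny at every use site, so toNat is exact there
def setCell (b : List (List Int)) (nx ny v : Int) : List (List Int) :=
  b.set nx.toNat ((PySem.List.pyGetD b nx []).set ny.toNat v)
-- number of board cells equal to n: fuel bound for both ports (each recursive call / stack push
-- first turns one such cell into 2, so with n ≠ 2 this bounds the work; a pure totality guard)
def countN (b : List (List Int)) (n : Int) : Nat := (b.map (fun r => r.count n)).sum

-- ===== PORT A =====
-- the `for i in range(4)` body of A, recursing through `rec`; acc is the running npos
def loopA (len n : Int)
    (rec : List (List Int) → Int → Int → List Int → List (List Int) × List (List Int))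
    (i : Nat) (b : List (List Int)) (x y : Int) (pos : List Int) (acc : List (List Int)) :
    List (List Int) × List (List Int) :=
  if _h : i < 4 then
    let nx := x + dxv i
    let ny := y + dyv i
    if 0 ≤ nx ∧ nx < len ∧ 0 ≤ ny ∧ ny < len then
      if getCell b nx ny = n then
        let pr := rec (setCell b nx ny 2) nx ny
          [PySem.List.pyGetD pos 0 0 + dxv i, PySem.List.pyGetD pos 1 0 + dyv i]
        loopA len n rec (i + 1) pr.1 x y pos (acc ++ pr.2)
      else loopA len n rec (i + 1) b x y pos acc
    else loopA len n rec (i + 1) b x y pos acc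
  else (b, acc)
termination_by 4 - i

-- A's recursion, fueled (returns the threaded board and npos)
def dfsA : Nat → List (List Int) → Int → Int → List Int → Int → Int →
    List (List Int) × List (List Int)
  | 0, b, _, _, pos, _, _ => (b, [pos])
  | (f + 1), b, x, y, pos, len, n =>
      loopA len n (fun b' x' y' p' => dfsA f b' x' y' p' len n) 0 b x y pos [pos]

def dfs (board : List (List Int)) (x : Int) (y : Int) (position : List Int) (length : Int) (n : Int) : List (List Int) :=
  (dfsA (countN board n + 1) board x y position length n).2

-- ===== PORT B =====
-- B's inner `while i < 4 … break`: scan from direction i for the first neighbour that triggers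
def findDir (len n : Int) (b : List (List Int)) (cx cy : Int) (i : Nat) : Option Nat :=
  if _h : i < 4 then
    let nx := cx + dxv i
    let ny := cy + dyv i
    if (0 ≤ nx ∧ nx < len ∧ 0 ≤ ny ∧ ny < len) ∧ getCell b nx ny = n then some i
    else findDir len n b cx cy (i + 1)
  else none
termination_by 4 - i

-- B's outer `while stack:` loop, fueled; state = (board, stack of frames, result)
def runB (len n : Int) : Nat → List (List Int) → List (Int × Int × List Int × Nat) →
    List (List Int) → List (List Int) × List (List Int)
  | 0, b, _, res => (b, res)
  | _ + 1, b, [], res => (b, res)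
  | (f + 1), b, (cx, cy, cpos, i) :: rest, res =>
    match findDir len n b cx cy i with
    | none => runB len n f b rest res
    | some j =>
      let nx := cx + dxv j
      let ny := cy + dyv j
      let npos := [PySem.List.pyGetD cpos 0 0 + dxv j, PySem.List.pyGetD cpos 1 0 + dyv j]
      runB len n f (setCell b nx ny 2) ((nx, ny, npos, 0) :: (cx, cy, cpos, j + 1) :: rest)
        (res ++ [npos])

def dfs_alt (board : List (List Int)) (x : Int) (y : Int) (position : List Int) (length : Int) (n : Int) : List (List Int) :=
  (runB length n (5 * countN board n + 5) board [(x, y, position, 0)] [position]).2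

-- ===== PRECONDITION & SPEC =====
-- neighbour i of (cx,cy) is in the length×length square and holds n (the condition that fires a recursive call)
abbrev trigC (len n : Int) (b : List (List Int)) (cx cy : Int) (i : Nat) : Prop :=
  (0 ≤ cx + dxv i ∧ cx + dxv i < len ∧ 0 ≤ cy + dyv i ∧ cy + dyv i < len) ∧
    getCell b (cx + dxv i) (cy + dyv i) = n

-- Pre_ excludes inputs where Python A raises: IndexError on a first-level neighbour access past the
-- actual board, and — whenever some neighbour triggers a recursive call — positions shorter than 2
-- (IndexError on position[0]) and boards/rows shorter than `length` (IndexError deeper in; this bound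
-- is slightly coarser than the exact raising set — see the cite), and RecursionError when n = 2 and
-- some marked neighbour itself has an in-bounds 2-neighbour (marking to 2 cannot close such cells, so
-- A recurses forever); shallow n = 2 components, on which A returns, stay inside Pre_.
def Pre_dfs (board : List (List Int)) (x : Int) (y : Int) (position : List Int) (length : Int) (n : Int) : Prop :=
  (∀ i : Nat, i < 4 →
      (0 ≤ x + dxv i ∧ x + dxv i < length ∧ 0 ≤ y + dyv i ∧ y + dyv i < length) →
      x + dxv i < (board.length : Int) ∧
        y + dyv i < ((PySem.List.pyGetD board (x + dxv i) []).length : Int)) ∧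
  ((∀ i : Nat, i < 4 → ¬ trigC length n board x y i) ∨
   (2 ≤ position.length ∧ length ≤ (board.length : Int) ∧
      (∀ r ∈ board, length ≤ (r.length : Int)) ∧
      (n ≠ 2 ∨ ∀ i : Nat, i < 4 → trigC length 2 board x y i →
          ∀ j : Nat, j < 4 → ¬ trigC length 2 board (x + dxv i) (y + dyv i) j)))

instance (board : List (List Int)) (x : Int) (y : Int) (position : List Int) (length : Int) (n : Int) : Decidable (Pre_dfs board x y position length n) := by
  unfold Pre_dfs
  exact @instDecidableAnd _ _ inferInstance (@instDecidableOr _ _ inferInstance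
    (@instDecidableAnd _ _ inferInstance (@instDecidableAnd _ _ inferInstance
      (@instDecidableAnd _ _ inferInstance (@instDecidableOr _ _ inferInstance inferInstance)))))

def pvWitness_dfs : List (List Int) × Int × Int × List Int × Int × Int :=
  ([[1, 1], [1, 3]], 0, 0, [0, 0], 2, 1)

def Spec_dfs (board : List (List Int)) (x : Int) (y : Int) (position : List Int) (length : Int) (n : Int) (out : List (List Int)) : Prop := out = dfs_alt board x y position length n
instance (board : List (List Int)) (x : Int) (y : Int) (position : List Int) (length : Int) (n : Int) (out : List (List Int)) : Decidable (Spec_dfs board x y position length n out) := by unfold Spec_dfs; infer_instance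

-- ===== CLAIM (what is proved, stated in full; the proofs are below) =====
def Claim_equal_dfs : Prop := ∀ (board : List (List Int)) (x : Int) (y : Int) (position : List Int) (length : Int) (n : Int), Dom_dfs board x y position length n → Pre_dfs board x y position length n → Spec_dfs board x y position length n (dfs board x y position length n)

-- ===== LEMMAS AND PROOFS =====

def boundsOK (b : List (List Int)) (len : Int) : Prop :=
  len ≤ (b.length : Int) ∧ ∀ r ∈ b, len ≤ (r.length : Int)

theorem witness_ok : Dom_dfs pvWitness_dfs.1 pvWitness_dfs.2.1 pvWitness_dfs.2.2.1
    pvWitness_dfs.2.2.2.1 pvWitness_dfs.2.2.2.2.1 pvWitness_dfs.2.2.2.2.2 ∧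
    Pre_dfs pvWitness_dfs.1 pvWitness_dfs.2.1 pvWitness_dfs.2.2.1
    pvWitness_dfs.2.2.2.1 pvWitness_dfs.2.2.2.2.1 pvWitness_dfs.2.2.2.2.2 := by
  constructor <;> decide

theorem loopA_acc (len n : Int)
    (rec : List (List Int) → Int → Int → List Int → List (List Int) × List (List Int)) :
    ∀ (m i : Nat) (b : List (List Int)) (x y : Int) (pos : List Int) (acc : List (List Int)),
      4 - i = m →
      loopA len n rec i b x y pos acc =
        ((loopA len n rec i b x y pos []).1, acc ++ (loopA len n rec i b x y pos []).2) := by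
  intro m
  induction m with
  | zero =>
    intro i b x y pos acc hm
    unfold loopA
    rw [dif_neg (by omega), dif_neg (by omega)]
    simp
  | succ m ih =>
    intro i b x y pos acc hm
    by_cases h4 : i < 4
    · conv_lhs => unfold loopA
      conv_rhs => unfold loopA
      rw [dif_pos h4, dif_pos h4]
      dsimp only
      split_ifs with hb1 hb2
      · rw [ih (i+1) _ x y pos (acc ++ _) (by omega)]
        rw [ih (i+1) _ x y pos ([] ++ _) (by omega)]
        simp
      · rw [ih (i+1) b x y pos acc (by omega)]
      · rw [ih (i+1) b x y pos acc (by omega)]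
    · unfold loopA
      rw [dif_neg h4, dif_neg h4]
      simp

theorem runB_nil (len n : Int) (f : Nat) (b : List (List Int)) (res : List (List Int)) :
    runB len n f b [] res = (b, res) := by
  cases f <;> rfl

theorem findDir_of_trig (len n : Int) (b : List (List Int)) (cx cy : Int) (i : Nat)
    (hi : i < 4) (h : trigC len n b cx cy i) : findDir len n b cx cy i = some i := by
  unfold findDir
  rw [dif_pos hi]
  simp only [if_pos h]

theorem findDir_of_not (len n : Int) (b : List (List Int)) (cx cy : Int) (i : Nat)
    (h : ¬ trigC len n b cx cy i) : findDir len n b cx cy i = findDir len n b cx cy (i + 1) := by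
  by_cases hi : i < 4
  · conv_lhs => unfold findDir
    rw [dif_pos hi]
    simp only [if_neg h]
  · have h4 : ¬ i + 1 < 4 := by omega
    unfold findDir
    rw [dif_neg hi, dif_neg h4]

theorem findDir_none (len n : Int) (b : List (List Int)) (cx cy : Int) :
    ∀ (m i : Nat), 4 - i = m → (∀ j : Nat, i ≤ j → j < 4 → ¬ trigC len n b cx cy j) →
      findDir len n b cx cy i = none := by
  intro m
  induction m with
  | zero =>
    intro i hi _
    unfold findDir
    rw [dif_neg (by omega)]
  | succ m ih =>
    intro i hi hno
    by_cases h4 : i < 4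
    · rw [findDir_of_not len n b cx cy i (hno i le_rfl h4)]
      by_cases h5 : i + 1 < 4
      · exact ih (i+1) (by omega) (fun j hj hj4 => hno j (by omega) hj4)
      · unfold findDir; rw [dif_neg h5]
    · unfold findDir; rw [dif_neg h4]

theorem runB_skip (len n : Int) (b : List (List Int)) (cx cy : Int) (cpos : List Int) (i : Nat)
    (h : ¬ trigC len n b cx cy i) (f : Nat) (rest : List (Int × Int × List Int × Nat))
    (res : List (List Int)) :
    runB len n f b ((cx, cy, cpos, i) :: rest) res =
      runB len n f b ((cx, cy, cpos, i + 1) :: rest) res := by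
  cases f with
  | zero => rfl
  | succ f =>
    show (match findDir len n b cx cy i with
      | none => runB len n f b rest res
      | some j => _) = _
    rw [findDir_of_not len n b cx cy i h]
    rfl

theorem count_set_row (n : Int) : ∀ (r : List Int) (iy : Nat), iy < r.length →
    r.getD iy 0 = n → n ≠ 2 → (r.set iy 2).count n + 1 = r.count n := by
  intro r
  induction r with
  | nil => intro iy h; simp at h
  | cons a as ih =>
    intro iy hlen heq hn2
    cases iy with
    | zero =>
      simp only [List.getD_cons_zero] at heq
      subst heq
      simp [Ne.symm hn2]
    | succ iy =>
      simp only [List.getD_cons_succ] at heq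
      simp only [List.set_cons_succ, List.count_cons]
      have := ih iy (by simpa using hlen) heq hn2
      omega

theorem countN_set (n : Int) : ∀ (b : List (List Int)) (ix iy : Nat) (_hx : ix < b.length),
    iy < (b.getD ix []).length → (b.getD ix []).getD iy 0 = n → n ≠ 2 →
    countN (b.set ix ((b.getD ix []).set iy 2)) n + 1 = countN b n := by
  intro b
  induction b with
  | nil => intro ix iy h; simp at h
  | cons r rs ih =>
    intro ix iy hx hy heq hn2
    cases ix with
    | zero =>
      simp only [List.getD_cons_zero] at hy heq ⊢
      simp only [List.set_cons_zero, countN, List.map_cons, List.sum_cons]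
      have := count_set_row n r iy hy heq hn2
      omega
    | succ ix =>
      simp only [List.getD_cons_succ] at hy heq ⊢
      simp only [List.set_cons_succ, countN, List.map_cons, List.sum_cons]
      have := ih ix iy (by simpa using hx) hy heq hn2
      simp only [countN] at this
      omega

theorem boundsOK_set (len : Int) (b : List (List Int)) (ix iy : Nat) (v : Int)
    (hb : boundsOK b len) : boundsOK (b.set ix ((b.getD ix []).set iy v)) len := by
  obtain ⟨h1, h2⟩ := hb
  by_cases hix : ix < b.length
  · refine ⟨by simpa using h1, ?_⟩
    intro r hr
    rcases List.mem_or_eq_of_mem_set hr with h | h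
    · exact h2 r h
    · subst h
      simp only [List.length_set]
      rw [List.getD_eq_getElem b [] hix]
      exact h2 _ (List.getElem_mem hix)
  · rw [List.set_eq_of_length_le (by omega)]
    exact ⟨h1, h2⟩

theorem runB_cons_none (len n : Int) (f : Nat) (b : List (List Int)) (cx cy : Int)
    (cpos : List Int) (i : Nat) (rest : List (Int × Int × List Int × Nat)) (res : List (List Int))
    (h : findDir len n b cx cy i = none) :
    runB len n (f + 1) b ((cx, cy, cpos, i) :: rest) res = runB len n f b rest res := by
  show (match findDir len n b cx cy i with
    | none => runB len n f b rest res
    | some j => _) = _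
  rw [h]

theorem runB_cons_some (len n : Int) (f : Nat) (b : List (List Int)) (cx cy : Int)
    (cpos : List Int) (i j : Nat) (rest : List (Int × Int × List Int × Nat)) (res : List (List Int))
    (h : findDir len n b cx cy i = some j) :
    runB len n (f + 1) b ((cx, cy, cpos, i) :: rest) res =
      runB len n f (setCell b (cx + dxv j) (cy + dyv j) 2)
        ((cx + dxv j, cy + dyv j,
            [PySem.List.pyGetD cpos 0 0 + dxv j, PySem.List.pyGetD cpos 1 0 + dyv j], 0) ::
          (cx, cy, cpos, j + 1) :: rest)
        (res ++ [[PySem.List.pyGetD cpos 0 0 + dxv j, PySem.List.pyGetD cpos 1 0 + dyv j]]) := by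
  show (match findDir len n b cx cy i with
    | none => _
    | some j => _) = _
  rw [h]

-- the simulation invariant: one frame of B's machine consumes exactly the subtree that A's
-- direction loop (from direction i) explores, producing the same board and the same output
theorem MAIN (len n : Int) (hn : n ≠ 2) : ∀ m : Nat,
    ∀ (b : List (List Int)) (i : Nat) (cx cy : Int) (cpos : List Int) (fA : Nat),
      5 * countN b n + (4 - i) ≤ m → i ≤ 4 → boundsOK b len → countN b n ≤ fA →
      boundsOK (loopA len n (fun b' x' y' p' => dfsA fA b' x' y' p' len n) i b cx cy cpos []).1 len ∧
      countN (loopA len n (fun b' x' y' p' => dfsA fA b' x' y' p' len n) i b cx cy cpos []).1 n ≤ countN b n ∧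
      ∃ k : Nat,
        k + 5 * countN (loopA len n (fun b' x' y' p' => dfsA fA b' x' y' p' len n) i b cx cy cpos []).1 n + i ≤
          5 + 5 * countN b n ∧
        ∀ (fB : Nat) (rest : List (Int × Int × List Int × Nat)) (res : List (List Int)),
          runB len n (k + fB) b ((cx, cy, cpos, i) :: rest) res =
            runB len n fB (loopA len n (fun b' x' y' p' => dfsA fA b' x' y' p' len n) i b cx cy cpos []).1
              rest (res ++ (loopA len n (fun b' x' y' p' => dfsA fA b' x' y' p' len n) i b cx cy cpos []).2) := by
  intro m
  induction m with
  | zero =>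
    intro b i cx cy cpos fA hm hi4 hb hfA
    have hi : i = 4 := by omega
    subst hi
    have hL : loopA len n (fun b' x' y' p' => dfsA fA b' x' y' p' len n) 4 b cx cy cpos [] = (b, []) := by
      unfold loopA; rw [dif_neg (by omega)]
    rw [hL]
    dsimp only
    refine ⟨hb, le_rfl, 1, by omega, ?_⟩
    intro fB rest res
    have h1 : 1 + fB = fB + 1 := by omega
    rw [h1, runB_cons_none len n fB b cx cy cpos 4 rest res
      (findDir_none len n b cx cy 0 4 rfl (fun j hj hj4 => absurd hj4 (by omega)))]
    simp
  | succ m ih =>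
    intro b i cx cy cpos fA hm hi4 hb hfA
    by_cases h4 : i < 4
    · by_cases htr : trigC len n b cx cy i
      · -- direction i triggers: mark, recurse (child), then continue at i+1
        obtain ⟨⟨hx0, hxlt, hy0, hylt⟩, hcell⟩ := htr
        have hbl := hb.1
        have hxI : (cx + dxv i).toNat < b.length := by omega
        have hrow : PySem.List.pyGetD b (cx + dxv i) [] = b.getD (cx + dxv i).toNat [] :=
          PySem.List.pyGetD_of_nonneg b [] hx0
        have hrlen : len ≤ ((b.getD (cx + dxv i).toNat []).length : Int) := by
          rw [List.getD_eq_getElem b [] hxI]; exact hb.2 _ (List.getElem_mem hxI)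
        have hyI : (cy + dyv i).toNat < (b.getD (cx + dxv i).toNat []).length := by omega
        have hcell' : (b.getD (cx + dxv i).toNat []).getD (cy + dyv i).toNat 0 = n := by
          have hc := hcell
          unfold getCell at hc
          rw [hrow, PySem.List.pyGetD_of_nonneg _ 0 hy0] at hc
          exact hc
        have hset : setCell b (cx + dxv i) (cy + dyv i) 2
            = b.set (cx + dxv i).toNat ((b.getD (cx + dxv i).toNat []).set (cy + dyv i).toNat 2) := by
          unfold setCell; rw [hrow]
        have hcount : countN (setCell b (cx + dxv i) (cy + dyv i) 2) n + 1 = countN b n := by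
          rw [hset]; exact countN_set n b _ _ hxI hyI hcell' hn
        have hbset : boundsOK (setCell b (cx + dxv i) (cy + dyv i) 2) len := by
          rw [hset]; exact boundsOK_set len b _ _ 2 hb
        cases fA with
        | zero => omega
        | succ f' =>
          obtain ⟨hAc, hBc, k1, hk1, heqc⟩ := ih (setCell b (cx + dxv i) (cy + dyv i) 2) 0
            (cx + dxv i) (cy + dyv i)
            [PySem.List.pyGetD cpos 0 0 + dxv i, PySem.List.pyGetD cpos 1 0 + dyv i] f'
            (by omega) (by omega) hbset (by omega)
          have hpr : dfsA (f' + 1) (setCell b (cx + dxv i) (cy + dyv i) 2)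
              (cx + dxv i) (cy + dyv i)
              [PySem.List.pyGetD cpos 0 0 + dxv i, PySem.List.pyGetD cpos 1 0 + dyv i] len n
              = ((loopA len n (fun b' x' y' p' => dfsA f' b' x' y' p' len n) 0
                    (setCell b (cx + dxv i) (cy + dyv i) 2) (cx + dxv i) (cy + dyv i)
                    [PySem.List.pyGetD cpos 0 0 + dxv i, PySem.List.pyGetD cpos 1 0 + dyv i] []).1,
                 [[PySem.List.pyGetD cpos 0 0 + dxv i, PySem.List.pyGetD cpos 1 0 + dyv i]] ++
                 (loopA len n (fun b' x' y' p' => dfsA f' b' x' y' p' len n) 0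
                    (setCell b (cx + dxv i) (cy + dyv i) 2) (cx + dxv i) (cy + dyv i)
                    [PySem.List.pyGetD cpos 0 0 + dxv i, PySem.List.pyGetD cpos 1 0 + dyv i] []).2) := by
            conv_lhs => rw [dfsA]
            rw [loopA_acc len n _ 4 0 _ _ _ _ _ rfl]
          obtain ⟨hAt, hBt, k2, hk2, heqt⟩ := ih
            (loopA len n (fun b' x' y' p' => dfsA f' b' x' y' p' len n) 0
              (setCell b (cx + dxv i) (cy + dyv i) 2) (cx + dxv i) (cy + dyv i)
              [PySem.List.pyGetD cpos 0 0 + dxv i, PySem.List.pyGetD cpos 1 0 + dyv i] []).1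
            (i + 1) cx cy cpos (f' + 1) (by omega) (by omega) hAc (by omega)
          have hL : loopA len n (fun b' x' y' p' => dfsA (f' + 1) b' x' y' p' len n) i b cx cy cpos []
              = ((loopA len n (fun b' x' y' p' => dfsA (f' + 1) b' x' y' p' len n) (i + 1)
                    (loopA len n (fun b' x' y' p' => dfsA f' b' x' y' p' len n) 0
                      (setCell b (cx + dxv i) (cy + dyv i) 2) (cx + dxv i) (cy + dyv i)
                      [PySem.List.pyGetD cpos 0 0 + dxv i, PySem.List.pyGetD cpos 1 0 + dyv i] []).1
                    cx cy cpos []).1,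
                 ([[PySem.List.pyGetD cpos 0 0 + dxv i, PySem.List.pyGetD cpos 1 0 + dyv i]] ++
                  (loopA len n (fun b' x' y' p' => dfsA f' b' x' y' p' len n) 0
                    (setCell b (cx + dxv i) (cy + dyv i) 2) (cx + dxv i) (cy + dyv i)
                    [PySem.List.pyGetD cpos 0 0 + dxv i, PySem.List.pyGetD cpos 1 0 + dyv i] []).2) ++
                 (loopA len n (fun b' x' y' p' => dfsA (f' + 1) b' x' y' p' len n) (i + 1)
                    (loopA len n (fun b' x' y' p' => dfsA f' b' x' y' p' len n) 0
                      (setCell b (cx + dxv i) (cy + dyv i) 2) (cx + dxv i) (cy + dyv i)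
                      [PySem.List.pyGetD cpos 0 0 + dxv i, PySem.List.pyGetD cpos 1 0 + dyv i] []).1
                    cx cy cpos []).2) := by
            conv_lhs => unfold loopA
            rw [dif_pos h4]
            dsimp only
            rw [if_pos ⟨hx0, hxlt, hy0, hylt⟩, if_pos hcell, hpr]
            dsimp only
            rw [List.nil_append,
              loopA_acc len n _ (4 - (i + 1)) (i + 1) _ cx cy cpos _ rfl]
          rw [hL]
          dsimp only
          refine ⟨hAt, by omega, 1 + k1 + k2, by omega, ?_⟩
          intro fB rest res
          have harith : 1 + k1 + k2 + fB = (k1 + (k2 + fB)) + 1 := by omega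
          rw [harith,
            runB_cons_some len n (k1 + (k2 + fB)) b cx cy cpos i i rest res
              (findDir_of_trig len n b cx cy i h4 ⟨⟨hx0, hxlt, hy0, hylt⟩, hcell⟩),
            heqc (k2 + fB) ((cx, cy, cpos, i + 1) :: rest) _,
            heqt fB rest _]
          congr 1
          simp
      · -- direction i does not trigger: A skips to i+1, B's scan skips it too
        have hL : loopA len n (fun b' x' y' p' => dfsA fA b' x' y' p' len n) i b cx cy cpos [] =
            loopA len n (fun b' x' y' p' => dfsA fA b' x' y' p' len n) (i + 1) b cx cy cpos [] := by
          conv_lhs => unfold loopA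
          rw [dif_pos h4]; dsimp only
          by_cases hb1 : 0 ≤ cx + dxv i ∧ cx + dxv i < len ∧ 0 ≤ cy + dyv i ∧ cy + dyv i < len
          · rw [if_pos hb1, if_neg (fun hc => htr ⟨⟨hb1.1, hb1.2.1, hb1.2.2.1, hb1.2.2.2⟩, hc⟩)]
          · rw [if_neg hb1]
        rw [hL]
        obtain ⟨hA, hB, k, hk, heq⟩ := ih b (i + 1) cx cy cpos fA (by omega) (by omega) hb hfA
        refine ⟨hA, hB, k, by omega, ?_⟩
        intro fB rest res
        rw [runB_skip len n b cx cy cpos i htr]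
        exact heq fB rest res
    · have hi : i = 4 := by omega
      subst hi
      have hL : loopA len n (fun b' x' y' p' => dfsA fA b' x' y' p' len n) 4 b cx cy cpos [] = (b, []) := by
        unfold loopA; rw [dif_neg (by omega)]
      rw [hL]
      dsimp only
      refine ⟨hb, le_rfl, 1, by omega, ?_⟩
      intro fB rest res
      have h1 : 1 + fB = fB + 1 := by omega
      rw [h1, runB_cons_none len n fB b cx cy cpos 4 rest res
        (findDir_none len n b cx cy 0 4 rfl (fun j hj hj4 => absurd hj4 (by omega)))]
      simp

theorem loopA_no_trig (len n : Int)
    (rec : List (List Int) → Int → Int → List Int → List (List Int) × List (List Int))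
    (b : List (List Int)) (x y : Int) :
    ∀ (m i : Nat) (pos : List Int) (acc : List (List Int)), 4 - i = m →
      (∀ j : Nat, i ≤ j → j < 4 → ¬ trigC len n b x y j) →
      loopA len n rec i b x y pos acc = (b, acc) := by
  intro m
  induction m with
  | zero =>
    intro i pos acc hm _
    unfold loopA
    rw [dif_neg (by omega)]
  | succ m ih =>
    intro i pos acc hm hno
    by_cases h4 : i < 4
    · unfold loopA
      rw [dif_pos h4]
      dsimp only
      have hni := hno i le_rfl h4
      split_ifs with hb1 hb2
      · exact absurd ⟨hb1, hb2⟩ hni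
      · exact ih (i+1) pos acc (by omega) (fun j hj hj4 => hno j (by omega) hj4)
      · exact ih (i+1) pos acc (by omega) (fun j hj hj4 => hno j (by omega) hj4)
    · unfold loopA
      rw [dif_neg h4]

-- if no neighbour of the start triggers, both ports return [position]
theorem dfs_eq_no_trig (board : List (List Int)) (x y : Int) (position : List Int)
    (length n : Int) (hno : ∀ i : Nat, i < 4 → ¬ trigC length n board x y i) :
    dfs board x y position length n = [position] ∧
    dfs_alt board x y position length n = [position] := by
  constructor
  · unfold dfs
    conv_lhs => rw [dfsA]
    rw [loopA_no_trig length n _ board x y 4 0 position [position] rfl (fun j _ hj4 => hno j hj4)]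
  · unfold dfs_alt
    have h5 : 5 * countN board n + 5 = (5 * countN board n + 4) + 1 := by omega
    rw [h5, runB_cons_none length n _ board x y position 0 [] [position]
      (findDir_none length n board x y 4 0 rfl (fun j _ hj4 => hno j hj4)), runB_nil]

-- setting an in-bounds cell back to its own value leaves the board unchanged (the n = 2 case:
-- "marking" an already-2 cell is a no-op)
theorem set_getD_self : ∀ (r : List Int) (iy : Nat), iy < r.length →
    r.set iy (r.getD iy 0) = r := by
  intro r
  induction r with
  | nil => intro iy h; simp at h
  | cons a as ih =>
    intro iy hlen
    cases iy with
    | zero => simp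
    | succ iy =>
      simp only [List.getD_cons_succ, List.set_cons_succ]
      rw [ih iy (by simpa using hlen)]

theorem setList_getD_self : ∀ (b : List (List Int)) (ix : Nat),
    b.set ix (b.getD ix []) = b := by
  intro b
  induction b with
  | nil => intro ix; simp
  | cons r rs ih =>
    intro ix
    cases ix with
    | zero => simp
    | succ ix => simp only [List.getD_cons_succ, List.set_cons_succ]; rw [ih ix]

theorem setCell_self (b : List (List Int)) (nx ny : Int) (hx0 : 0 ≤ nx) (hy0 : 0 ≤ ny)
    (hx : nx.toNat < b.length) (hy : ny.toNat < (b.getD nx.toNat []).length)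
    (hc : getCell b nx ny = 2) : setCell b nx ny 2 = b := by
  have hrow : PySem.List.pyGetD b nx [] = b.getD nx.toNat [] :=
    PySem.List.pyGetD_of_nonneg b [] hx0
  have hc' : (b.getD nx.toNat []).getD ny.toNat 0 = 2 := by
    unfold getCell at hc
    rw [hrow, PySem.List.pyGetD_of_nonneg _ 0 hy0] at hc
    exact hc
  have hrs : (b.getD nx.toNat []).set ny.toNat 2 = b.getD nx.toNat [] := by
    rw [← hc']; exact set_getD_self _ _ hy
  unfold setCell
  rw [hrow, hrs, setList_getD_self]

-- an in-bounds cell equal to n makes countN positive (fuel is then large enough in SHALLOW)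
theorem countN_pos (n : Int) : ∀ (b : List (List Int)) (ix iy : Nat), ix < b.length →
    iy < (b.getD ix []).length → (b.getD ix []).getD iy 0 = n → 1 ≤ countN b n := by
  intro b
  induction b with
  | nil => intro ix iy h; simp at h
  | cons r rs ih =>
    intro ix iy hx hy heq
    cases ix with
    | zero =>
      simp only [List.getD_cons_zero] at hy heq
      have : n ∈ r := by
        rw [← heq, List.getD_eq_getElem r 0 hy]
        exact List.getElem_mem hy
      have := List.count_pos_iff.mpr this
      simp only [countN, List.map_cons, List.sum_cons]
      omega
    | succ ix =>
      simp only [List.getD_cons_succ] at hy heq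
      have := ih ix iy (by simpa using hx) hy heq
      simp only [countN, List.map_cons, List.sum_cons]
      simp only [countN] at this
      omega

-- n = 2, depth-1 case: every triggered neighbour of the start has no trigger of its own, so
-- "marking" is a no-op and A's frame at (x,y) is consumed by B's machine in ≤ 9 steps
theorem SHALLOW (len : Int) (b : List (List Int)) (x y : Int)
    (hb : boundsOK b len)
    (hsh : ∀ i : Nat, i < 4 → trigC len 2 b x y i →
        ∀ j : Nat, j < 4 → ¬ trigC len 2 b (x + dxv i) (y + dyv i) j) :
    ∀ (m i : Nat), 4 - i = m →
      ∀ (fA : Nat) (pos : List Int), 1 ≤ fA →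
      (loopA len 2 (fun b' x' y' p' => dfsA fA b' x' y' p' len 2) i b x y pos []).1 = b ∧
      ∃ k : Nat, k ≤ 1 + 2 * (4 - i) ∧
        ∀ (fB : Nat) (rest : List (Int × Int × List Int × Nat)) (res : List (List Int)),
          runB len 2 (k + fB) b ((x, y, pos, i) :: rest) res =
            runB len 2 fB b rest
              (res ++ (loopA len 2 (fun b' x' y' p' => dfsA fA b' x' y' p' len 2) i b x y pos []).2) := by
  intro m
  induction m with
  | zero =>
    intro i hm fA pos _
    have hL : loopA len 2 (fun b' x' y' p' => dfsA fA b' x' y' p' len 2) i b x y pos [] = (b, []) := by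
      unfold loopA; rw [dif_neg (by omega)]
    rw [hL]
    refine ⟨rfl, 1, by omega, ?_⟩
    intro fB rest res
    have h1 : 1 + fB = fB + 1 := by omega
    rw [h1, runB_cons_none len 2 fB b x y pos i rest res
      (findDir_none len 2 b x y 0 i (by omega) (fun j hj hj4 => absurd hj4 (by omega)))]
    simp
  | succ m ih =>
    intro i hm fA pos hfA
    by_cases h4 : i < 4
    · by_cases htr : trigC len 2 b x y i
      · have hno := hsh i h4 htr
        obtain ⟨⟨hx0, hxlt, hy0, hylt⟩, hcell⟩ := htr
        have hbl := hb.1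
        have hxI : (x + dxv i).toNat < b.length := by omega
        have hrlen : len ≤ ((b.getD (x + dxv i).toNat []).length : Int) := by
          rw [List.getD_eq_getElem b [] hxI]; exact hb.2 _ (List.getElem_mem hxI)
        have hyI : (y + dyv i).toNat < (b.getD (x + dxv i).toNat []).length := by omega
        have hsetid : setCell b (x + dxv i) (y + dyv i) 2 = b :=
          setCell_self b _ _ hx0 hy0 hxI hyI hcell
        cases fA with
        | zero => omega
        | succ f' =>
          have hpr : dfsA (f' + 1) b (x + dxv i) (y + dyv i)
              [PySem.List.pyGetD pos 0 0 + dxv i, PySem.List.pyGetD pos 1 0 + dyv i] len 2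
              = (b, [[PySem.List.pyGetD pos 0 0 + dxv i, PySem.List.pyGetD pos 1 0 + dyv i]]) := by
            conv_lhs => rw [dfsA]
            rw [loopA_no_trig len 2 _ b (x + dxv i) (y + dyv i) 4 0 _ _ rfl
              (fun j _ hj4 => hno j hj4)]
          obtain ⟨hIH1, k', hk', heq'⟩ := ih (i + 1) (by omega) (f' + 1) pos (by omega)
          have hL : loopA len 2 (fun b' x' y' p' => dfsA (f' + 1) b' x' y' p' len 2) i b x y pos []
              = ((loopA len 2 (fun b' x' y' p' => dfsA (f' + 1) b' x' y' p' len 2) (i + 1) b x y pos []).1,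
                 [[PySem.List.pyGetD pos 0 0 + dxv i, PySem.List.pyGetD pos 1 0 + dyv i]] ++
                 (loopA len 2 (fun b' x' y' p' => dfsA (f' + 1) b' x' y' p' len 2) (i + 1) b x y pos []).2) := by
            conv_lhs => unfold loopA
            rw [dif_pos h4]
            dsimp only
            rw [if_pos ⟨hx0, hxlt, hy0, hylt⟩, if_pos hcell, hsetid, hpr]
            dsimp only
            rw [List.nil_append, loopA_acc len 2 _ (4 - (i + 1)) (i + 1) b x y pos _ rfl]
          rw [hL]
          dsimp only
          refine ⟨hIH1, 2 + k', by omega, ?_⟩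
          intro fB rest res
          have harith : 2 + k' + fB = ((k' + fB) + 1) + 1 := by omega
          rw [harith,
            runB_cons_some len 2 ((k' + fB) + 1) b x y pos i i rest res
              (findDir_of_trig len 2 b x y i h4 ⟨⟨hx0, hxlt, hy0, hylt⟩, hcell⟩),
            hsetid,
            runB_cons_none len 2 (k' + fB) b (x + dxv i) (y + dyv i) _ 0 _ _
              (findDir_none len 2 b (x + dxv i) (y + dyv i) 4 0 rfl (fun j _ hj4 => hno j hj4)),
            heq' fB rest _]
          congr 1
          simp
      · have hL : loopA len 2 (fun b' x' y' p' => dfsA fA b' x' y' p' len 2) i b x y pos [] =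
            loopA len 2 (fun b' x' y' p' => dfsA fA b' x' y' p' len 2) (i + 1) b x y pos [] := by
          conv_lhs => unfold loopA
          rw [dif_pos h4]; dsimp only
          by_cases hb1 : 0 ≤ x + dxv i ∧ x + dxv i < len ∧ 0 ≤ y + dyv i ∧ y + dyv i < len
          · rw [if_pos hb1, if_neg (fun hc => htr ⟨⟨hb1.1, hb1.2.1, hb1.2.2.1, hb1.2.2.2⟩, hc⟩)]
          · rw [if_neg hb1]
        rw [hL]
        obtain ⟨hIH1, k', hk', heq'⟩ := ih (i + 1) (by omega) fA pos hfA
        refine ⟨hIH1, k', by omega, ?_⟩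
        intro fB rest res
        rw [runB_skip len 2 b x y pos i htr]
        exact heq' fB rest res
    · have hL : loopA len 2 (fun b' x' y' p' => dfsA fA b' x' y' p' len 2) i b x y pos [] = (b, []) := by
        unfold loopA; rw [dif_neg h4]
      rw [hL]
      refine ⟨rfl, 1, by omega, ?_⟩
      intro fB rest res
      have h1 : 1 + fB = fB + 1 := by omega
      rw [h1, runB_cons_none len 2 fB b x y pos i rest res
        (findDir_none len 2 b x y 0 i (by omega) (fun j hj hj4 => absurd hj4 (by omega)))]
      simp

-- ===== VERDICT (by name: the statement is the Claim_ definition above) =====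
theorem dfs_spec : Claim_equal_dfs := by
  unfold Claim_equal_dfs
  intro board x y position length n _hDom hPre
  unfold Spec_dfs
  obtain ⟨_hsafe, hdisj⟩ := hPre
  rcases hdisj with hno | ⟨_hpos, hbl, hrows, hn⟩
  · -- no neighbour triggers a recursive call: both sides return [position]
    obtain ⟨hA, hB⟩ := dfs_eq_no_trig board x y position length n hno
    rw [hA, hB]
  · by_cases hn2 : n = 2
    · -- n = 2: Pre_ guarantees the shallow case (marking is a no-op, depth ≤ 1)
      subst hn2
      have hsh := hn.resolve_left (by simp)
      by_cases hex : ∃ i : Nat, i < 4 ∧ trigC length 2 board x y i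
      · obtain ⟨i0, hi04, htr0⟩ := hex
        -- a trigger exists, so some cell equals 2 and both fuels are ≥ the needed bounds
        obtain ⟨⟨hx0, hxlt, hy0, hylt⟩, hcell⟩ := htr0
        have hxI : (x + dxv i0).toNat < board.length := by omega
        have hrlen : length ≤ ((board.getD (x + dxv i0).toNat []).length : Int) := by
          rw [List.getD_eq_getElem board [] hxI]; exact hrows _ (List.getElem_mem hxI)
        have hyI : (y + dyv i0).toNat < (board.getD (x + dxv i0).toNat []).length := by omega
        have hcell' : (board.getD (x + dxv i0).toNat []).getD (y + dyv i0).toNat 0 = 2 := by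
          have hc := hcell
          unfold getCell at hc
          rw [PySem.List.pyGetD_of_nonneg board [] hx0,
            PySem.List.pyGetD_of_nonneg _ 0 hy0] at hc
          exact hc
        have hcN : 1 ≤ countN board 2 := countN_pos 2 board _ _ hxI hyI hcell'
        obtain ⟨hb_eq, k, hk, heq⟩ := SHALLOW length board x y ⟨hbl, hrows⟩ hsh 4 0 rfl
          (countN board 2) position hcN
        unfold dfs dfs_alt
        conv_lhs => rw [dfsA]
        rw [loopA_acc length 2 _ 4 0 board x y position [position] rfl]
        have hfb : k + (5 * countN board 2 + 5 - k) = 5 * countN board 2 + 5 := by omega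
        rw [← hfb, heq (5 * countN board 2 + 5 - k) [] [position], runB_nil]
      · push Not at hex
        obtain ⟨hA, hB⟩ := dfs_eq_no_trig board x y position length 2
          (fun i hi => hex i hi)
        rw [hA, hB]
    · -- n ≠ 2: the count-of-n fuel argument (MAIN) applies
      obtain ⟨hA1, _hB1, k, hk, heq⟩ := MAIN length n hn2 (5 * countN board n + 4) board 0 x y
        position (countN board n) (by omega) (by omega) ⟨hbl, hrows⟩ le_rfl
      unfold dfs dfs_alt
      conv_lhs => rw [dfsA]
      rw [loopA_acc length n _ 4 0 board x y position [position] rfl]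
      have hfb : k + (5 * countN board n + 5 - k) = 5 * countN board n + 5 := by omega
      rw [← hfb, heq (5 * countN board n + 5 - k) [] [position], runB_nil]
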